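-- pv_equiv track=rewrite | github.com/zaharevic/hw4 | 2/main.py | CircleCounter
-- ===== SOURCE A (Python) =====
-- def CircleCounter(dct, size):
--     sum_list = []
--     for i in range(0, size):
--         if (i == size - 1):
--             sum = dct[i] + dct[i - 1] + dct[0]
--         elif(i == 0):
--             sum = dct[i] + dct[size - 1] + dct[i +1]
--         else:
--             sum = dct[i] + dct[i - 1] + dct[i + 1]
--         sum_list.append(sum)
--         sum_list.sort()
--     return sum_list[-1]
-- ===== SOURCE B (Python) =====
-- def _nsum(dct, size, i):
--     # sum of dct[i] with its two neighbors on the circle of the first `size` elements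
--     if 0 < i < size - 1:
--         return dct[i - 1] + dct[i] + dct[i + 1]
--     if i == size - 1:          # also covers size == 1 (then dct[i - 1] is dct[-1])
--         return dct[i - 1] + dct[i] + dct[0]
--     return dct[size - 1] + dct[0] + dct[1]
--
--
-- def CircleCounter(dct, size):
--     best = None
--     for i in range(size):
--         s = _nsum(dct, size, i)
--         if best is None or s > best:
--             best = s
--     return best
-- ===== Notes on version B (the rewrite author's own statement) =====
-- stated objective: faster
-- what changed: B replaces A's append-then-re-sort-the-whole-list-each-iteration scheme (answer = last element of the final sorted list) by a single pass that tracks the running maximum of the neighbor sums, computed by a small helper; no list is built and nothing is sorted.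
import Mathlib
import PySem

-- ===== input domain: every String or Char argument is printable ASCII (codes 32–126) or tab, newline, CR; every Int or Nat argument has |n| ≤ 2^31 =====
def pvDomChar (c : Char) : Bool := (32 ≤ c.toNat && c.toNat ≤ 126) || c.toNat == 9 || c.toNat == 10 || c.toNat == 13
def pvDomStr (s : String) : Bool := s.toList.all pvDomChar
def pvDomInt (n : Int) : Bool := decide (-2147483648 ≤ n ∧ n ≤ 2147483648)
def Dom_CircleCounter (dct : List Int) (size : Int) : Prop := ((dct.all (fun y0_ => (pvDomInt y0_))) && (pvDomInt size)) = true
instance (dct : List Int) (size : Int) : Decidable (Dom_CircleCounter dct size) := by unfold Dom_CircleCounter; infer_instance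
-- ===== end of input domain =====

-- B replaces A's append-then-re-sort-the-whole-list loop (answer = last element of the final
-- sorted list) by a single pass tracking the running maximum of the per-index neighbor sums.


-- ===== PORT A =====
-- literal port of A: build sum_list, appending each branch-computed sum and re-sorting
-- the whole list every iteration, return sum_list[-1]
def CircleCounter (dct : List Int) (size : Int) : Int :=
  let sum_list :=
    (PySem.List.pyRange 0 size 1).foldl (fun sl i =>
      let s :=
        if i = size - 1 then
          PySem.List.pyGetD dct i 0 + PySem.List.pyGetD dct (i - 1) 0 + PySem.List.pyGetD dct 0 0
        else if i = 0 then
          PySem.List.pyGetD dct i 0 + PySem.List.pyGetD dct (size - 1) 0 + PySem.List.pyGetD dct (i + 1) 0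
        else
          PySem.List.pyGetD dct i 0 + PySem.List.pyGetD dct (i - 1) 0 + PySem.List.pyGetD dct (i + 1) 0
      PySem.List.sorted (sl ++ [s]) (fun x => x) false) []
  PySem.List.pyGetD sum_list (-1) 0

-- ===== PORT B =====
-- port of Source B's helper _nsum (Python's chained 0 < i < size - 1 is the conjunction)
def CircleCounter_nsum (dct : List Int) (size : Int) (i : Int) : Int :=
  if 0 < i ∧ i < size - 1 then
    PySem.List.pyGetD dct (i - 1) 0 + PySem.List.pyGetD dct i 0 + PySem.List.pyGetD dct (i + 1) 0
  else if i = size - 1 then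
    PySem.List.pyGetD dct (i - 1) 0 + PySem.List.pyGetD dct i 0 + PySem.List.pyGetD dct 0 0
  else
    PySem.List.pyGetD dct (size - 1) 0 + PySem.List.pyGetD dct 0 0 + PySem.List.pyGetD dct 1 0

-- literal port of B: one pass, best = running maximum (None before the first iteration)
def CircleCounter_alt (dct : List Int) (size : Int) : Int :=
  let best :=
    (PySem.List.pyRange 0 size 1).foldl (fun best i =>
      let s := CircleCounter_nsum dct size i
      match best with
      | none => some s
      | some b => if s > b then some s else some b) (none : Option Int)
  best.getD 0

-- ===== PRECONDITION & SPEC =====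
-- A raises IndexError when size ≤ 0 (sum_list[-1] on the empty list) or size > len(dct); Pre_ excludes exactly those.
def Pre_CircleCounter (dct : List Int) (size : Int) : Prop := 1 ≤ size ∧ size ≤ (dct.length : Int)
instance (dct : List Int) (size : Int) : Decidable (Pre_CircleCounter dct size) := by unfold Pre_CircleCounter; infer_instance
def pvWitness_CircleCounter : List Int × Int := ([5, -2, 7, 1], 4)

def Spec_CircleCounter (dct : List Int) (size : Int) (out : Int) : Prop := out = CircleCounter_alt dct size
instance (dct : List Int) (size : Int) (out : Int) : Decidable (Spec_CircleCounter dct size out) := by unfold Spec_CircleCounter; infer_instance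

-- ===== CLAIM (what is proved, stated in full; the proofs are below) =====
def Claim_equal_CircleCounter : Prop := ∀ (dct : List Int) (size : Int), Dom_CircleCounter dct size → Pre_CircleCounter dct size → Spec_CircleCounter dct size (CircleCounter dct size)

-- ===== LEMMAS AND PROOFS =====

-- proof-side name for A's per-index sum
def fAux (dct : List Int) (size : Int) (i : Int) : Int :=
  if i = size - 1 then
    PySem.List.pyGetD dct i 0 + PySem.List.pyGetD dct (i - 1) 0 + PySem.List.pyGetD dct 0 0
  else if i = 0 then
    PySem.List.pyGetD dct i 0 + PySem.List.pyGetD dct (size - 1) 0 + PySem.List.pyGetD dct (i + 1) 0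
  else
    PySem.List.pyGetD dct i 0 + PySem.List.pyGetD dct (i - 1) 0 + PySem.List.pyGetD dct (i + 1) 0

-- A's loop: repeatedly sorting after each append is sorting the whole mapped list.
theorem foldl_sort_append (f : Int → Int) (xs : List Int) (sl : List Int)
    (h : sl.Pairwise (· ≤ ·)) :
    xs.foldl (fun sl i => PySem.List.sorted (sl ++ [f i]) (fun x => x) false) sl
      = PySem.List.sorted (sl ++ xs.map f) (fun x => x) false := by
  induction xs generalizing sl with
  | nil =>
      simp [PySem.List.sorted_eq_self_of_pairwise _ _ (by simpa using h)]
  | cons x xs ih =>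
      simp only [List.foldl_cons, List.map_cons]
      rw [ih _ (by simpa using PySem.List.sorted_pairwise (sl ++ [f x]) (fun x => x) )]
      apply PySem.List.sorted_eq_sorted_of_perm _ _ _ (fun a b => id)
      exact ((PySem.List.sorted_perm (sl ++ [f x]) _ _).append_right _).trans
        (List.Perm.of_eq (by simp))

-- the last element of a (≤)-sorted permutation of y :: t is the running maximum
theorem getLast_eq_foldl_max_of_perm (y : Int) (t : List Int) (L : List Int) (h : L ≠ [])
    (hperm : L.Perm (y :: t)) (hpair : L.Pairwise (· ≤ ·)) :
    L.getLast h = t.foldl max y := by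
  have hmem : L.getLast h ∈ y :: t := hperm.mem_iff.mp (List.getLast_mem h)
  have hmax := (PySem.List.le_foldl_max t y).2
  have h1 : L.getLast h ≤ t.foldl max y := by
    rcases List.mem_cons.mp hmem with h' | h'
    · rw [h']; exact (PySem.List.le_foldl_max t y).1
    · exact hmax _ h'
  have hfmem : t.foldl max y ∈ L := by
    apply hperm.mem_iff.mpr
    rcases PySem.List.foldl_max_mem t y with h' | h'
    · rw [h']; exact List.mem_cons_self
    · exact List.mem_cons_of_mem _ h'
  exact le_antisymm h1 (hpair.rel_getLast hfmem)

theorem getLast_sorted_eq_foldl_max (y : Int) (t : List Int)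
    (h : PySem.List.sorted (y :: t) (fun x => x) false ≠ []) :
    (PySem.List.sorted (y :: t) (fun x => x) false).getLast h = t.foldl max y :=
  getLast_eq_foldl_max_of_perm y t _ h (PySem.List.sorted_perm _ _ _)
    (by simpa using PySem.List.sorted_pairwise (y :: t) (fun x => x))

-- B's loop: the option-best fold started from some b is the plain running maximum
theorem foldl_best_some (g : Int → Int) (xs : List Int) (b : Int) :
    xs.foldl (fun best i =>
        match best with
        | none => some (g i)
        | some b => if g i > b then some (g i) else some b) (some b)
      = some (xs.foldl (fun b i => max b (g i)) b) := by
  induction xs generalizing b with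
  | nil => rfl
  | cons x xs ih =>
      simp only [List.foldl_cons]
      rw [show (if g x > b then some (g x) else some b) = some (max b (g x)) by
        by_cases h : g x > b <;> simp [h, max_def] <;> omega]
      exact ih _

-- A's port evaluates to the running maximum of fAux over the circle
theorem A_eval (dct : List Int) (size : Int) (h : 1 ≤ size) :
    CircleCounter dct size
      = ((PySem.List.pyRange 1 size 1).map (fAux dct size)).foldl max (fAux dct size 0) := by
  show PySem.List.pyGetD
      ((PySem.List.pyRange 0 size 1).foldl
        (fun sl i => PySem.List.sorted (sl ++ [fAux dct size i]) (fun x => x) false) [])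
      (-1) 0 = _
  rw [foldl_sort_append _ _ _ List.Pairwise.nil,
      PySem.List.pyRange_one_cons (by omega), show (0:Int) + 1 = 1 by norm_num,
      List.map_cons, List.nil_append]
  have hne : PySem.List.sorted (fAux dct size 0 :: (PySem.List.pyRange 1 size 1).map (fAux dct size)) (fun x => x) false ≠ [] := by
    rw [Ne, PySem.List.sorted_eq_nil_iff]; simp
  rw [PySem.List.pyGetD_neg_one _ _ hne, getLast_sorted_eq_foldl_max]

-- B's port evaluates to the same running maximum of its helper
theorem B_eval (dct : List Int) (size : Int) (h : 1 ≤ size) :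
    CircleCounter_alt dct size
      = ((PySem.List.pyRange 1 size 1).map (CircleCounter_nsum dct size)).foldl max (CircleCounter_nsum dct size 0) := by
  show (((PySem.List.pyRange 0 size 1).foldl
      (fun best i =>
        match best with
        | none => some (CircleCounter_nsum dct size i)
        | some b => if CircleCounter_nsum dct size i > b then some (CircleCounter_nsum dct size i) else some b)
      (none : Option Int)).getD 0) = _
  rw [PySem.List.pyRange_one_cons (by omega), show (0:Int) + 1 = 1 by norm_num, List.foldl_cons]
  show ((PySem.List.pyRange 1 size 1).foldl _ (some (CircleCounter_nsum dct size 0))).getD 0 = _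
  rw [foldl_best_some, Option.getD_some, List.foldl_map]

-- the two per-index sums coincide on the circle
theorem fAux_eq_nsum (dct : List Int) (size : Int) (i : Int)
    (h0 : 0 ≤ i) (hi : i < size) : fAux dct size i = CircleCounter_nsum dct size i := by
  unfold fAux CircleCounter_nsum
  by_cases hlast : i = size - 1
  · rw [if_pos hlast, if_neg (by omega), if_pos hlast]
    omega
  · by_cases hz : i = 0
    · subst hz
      rw [if_neg hlast, if_pos rfl, if_neg (by omega), if_neg hlast,
          show (0:Int) + 1 = 1 by norm_num]
      omega
    · rw [if_neg hlast, if_neg hz, if_pos (by omega)]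
      omega

-- ===== VERDICT (by name: the statement is the Claim_ definition above) =====
theorem CircleCounter_spec : Claim_equal_CircleCounter := by
  intro dct size _hdom hpre
  unfold Spec_CircleCounter
  obtain ⟨h1, _h2⟩ := hpre
  rw [A_eval dct size h1, B_eval dct size h1]
  rw [fAux_eq_nsum dct size 0 le_rfl (by omega)]
  congr 1
  apply List.map_congr_left
  intro i hi
  rw [PySem.List.mem_pyRange_one] at hi
  exact fAux_eq_nsum dct size i (by omega) hi.2
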